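-- pv_equiv track=rewrite | github.com/Black-Dress/leetcode-dailyProblem | 2021/july.py | LCP07_BFS
-- ===== SOURCE A (Python) =====
-- import collections
-- from typing import Collection, Counter, List
--
-- def LCP07_BFS(relation: List[List[int]], k: int, n: int) -> int:
--     edges = collections.defaultdict(list)
--     for i in relation:
--         edges[i[0]].append(i[1])
--     steps, queue = 0, collections.deque([0])
--     while queue.__len__() and steps < k:
--         steps += 1
--         for i in range(queue.__len__()):
--             to = edges[queue.popleft()]
--             queue.extend(to)
--     res = 0
--     if steps == k:
--         while queue.__len__():
--             res += 1 if queue.popleft() == n - 1 else 0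
--     return res
-- ===== SOURCE B (Python) =====
-- import collections
-- from typing import List
--
--
-- def LCP07_BFS(relation: List[List[int]], k: int, n: int) -> int:
--     if k < 0:
--         return 0
--     edges = collections.defaultdict(list)
--     for i in relation:
--         edges[i[0]].append(i[1])
--     # dp[v] = number of walks of the current length from 0 to v
--     dp = {0: 1}
--     for _ in range(k):
--         if not dp:
--             break
--         ndp = collections.defaultdict(int)
--         for u, c in dp.items():
--             for v in edges.get(u, ()):
--                 ndp[v] += c
--         dp = ndp
--     return dp.get(n - 1, 0)
-- ===== Notes on version B (the rewrite author's own statement) =====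
-- stated objective: alternative
-- what changed: Replaces the BFS queue that stores one entry per walk by a dynamic-programming counter dp[v] = number of length-s walks from 0 to v, updated k times over the edge lists.
-- outside the precondition, e.g. on LCP07_BFS([[0]], 1, 1): A raises IndexError, B raises IndexError
import Mathlib
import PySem

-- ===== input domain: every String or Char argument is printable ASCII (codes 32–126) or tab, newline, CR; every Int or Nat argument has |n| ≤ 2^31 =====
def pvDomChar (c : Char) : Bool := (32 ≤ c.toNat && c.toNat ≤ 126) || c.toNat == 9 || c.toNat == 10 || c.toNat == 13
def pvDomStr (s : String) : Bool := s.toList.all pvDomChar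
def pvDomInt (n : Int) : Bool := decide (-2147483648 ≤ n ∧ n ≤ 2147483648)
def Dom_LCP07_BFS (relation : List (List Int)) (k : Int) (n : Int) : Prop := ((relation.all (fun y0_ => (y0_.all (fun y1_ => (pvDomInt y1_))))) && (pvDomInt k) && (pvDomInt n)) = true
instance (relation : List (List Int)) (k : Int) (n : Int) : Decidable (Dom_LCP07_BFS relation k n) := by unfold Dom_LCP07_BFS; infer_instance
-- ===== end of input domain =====

-- B replaces A's walk-enumerating BFS queue by a dictionary DP counting walks per endpoint (same value, different algorithm).


-- ===== PORT A =====
-- shared helper: 'edges = defaultdict(list); for i in relation: edges[i[0]].append(i[1])'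
-- row access i[0]/i[1] uses pyGet? with a .getD 0 fallback: exact on Pre_ (every row has ≥ 2 entries; A raises IndexError otherwise)
def buildEdges (relation : List (List Int)) : PySem.Dict Int (List Int) :=
  relation.foldl
    (fun d i => d.modify ((PySem.List.pyGet? i 0).getD 0) [] (fun l => l ++ [(PySem.List.pyGet? i 1).getD 0]))
    PySem.Dict.empty

-- one round of the inner 'for i in range(len(queue)): to = edges[popleft]; queue.extend(to)'
def stepQueue (E : PySem.Dict Int (List Int)) (q : List Int) : List Int :=
  q.foldl (fun acc u => acc ++ E.getD u []) []

-- 'while queue and steps < k': fuel = k - steps; returns (number of iterations done, final queue)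
def loopA (E : PySem.Dict Int (List Int)) : Nat → List Int → Nat × List Int
  | 0, q => (0, q)
  | _ + 1, [] => (0, [])
  | f + 1, u :: rest =>
      let p := loopA E f (stepQueue E (u :: rest))
      (p.1 + 1, p.2)

def LCP07_BFS (relation : List (List Int)) (k : Int) (n : Int) : Int :=
  let E := buildEdges relation
  let r := loopA E k.toNat [0]
  if (r.1 : Int) = k then
    r.2.foldl (fun res x => res + if x = n - 1 then 1 else 0) 0
  else 0

-- ===== PORT B =====
-- 'ndp = defaultdict(int); for u, c in dp.items(): for v in edges.get(u, ()): ndp[v] += c'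
def stepDP (E : PySem.Dict Int (List Int)) (dp : PySem.Dict Int Int) : PySem.Dict Int Int :=
  dp.items.foldl
    (fun nd p => (E.getD p.1 []).foldl (fun nd v => nd.modify v 0 (fun c => c + p.2)) nd)
    PySem.Dict.empty

-- 'for _ in range(k): if not dp: break; dp = step(dp)'
def loopB (E : PySem.Dict Int (List Int)) : Nat → PySem.Dict Int Int → PySem.Dict Int Int
  | 0, dp => dp
  | f + 1, dp => if dp.items = [] then dp else loopB E f (stepDP E dp)

def LCP07_BFS_alt (relation : List (List Int)) (k : Int) (n : Int) : Int :=
  if k < 0 then 0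
  else
    let E := buildEdges relation
    (loopB E k.toNat (PySem.Dict.empty.insert 0 1)).getD (n - 1) 0

-- ===== PRECONDITION & SPEC =====
-- Pre_ excludes rows of relation with fewer than 2 entries, on which A raises IndexError (i[0]/i[1]).
def Pre_LCP07_BFS (relation : List (List Int)) (k : Int) (n : Int) : Prop :=
  ∀ r ∈ relation, 2 ≤ r.length
instance (relation : List (List Int)) (k : Int) (n : Int) : Decidable (Pre_LCP07_BFS relation k n) := by
  unfold Pre_LCP07_BFS; infer_instance
def pvWitness_LCP07_BFS : List (List Int) × Int × Int := ([[0, 1], [1, 1]], 2, 2)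

def Spec_LCP07_BFS (relation : List (List Int)) (k : Int) (n : Int) (out : Int) : Prop := out = LCP07_BFS_alt relation k n
instance (relation : List (List Int)) (k : Int) (n : Int) (out : Int) : Decidable (Spec_LCP07_BFS relation k n out) := by unfold Spec_LCP07_BFS; infer_instance

-- ===== CLAIM (what is proved, stated in full; the proofs are below) =====
def Claim_equal_LCP07_BFS : Prop := ∀ (relation : List (List Int)) (k : Int) (n : Int), Dom_LCP07_BFS relation k n → Pre_LCP07_BFS relation k n → Spec_LCP07_BFS relation k n (LCP07_BFS relation k n)

-- ===== LEMMAS AND PROOFS =====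

-- queue after s rounds, as a total iteration (stepQueue [] = [])
def qIter (E : PySem.Dict Int (List Int)) : Nat → List Int → List Int
  | 0, q => q
  | f + 1, q => qIter E f (stepQueue E q)

theorem stepQueue_nil (E : PySem.Dict Int (List Int)) : stepQueue E [] = [] := rfl

theorem qIter_nil (E : PySem.Dict Int (List Int)) : ∀ f, qIter E f [] = []
  | 0 => rfl
  | f + 1 => by simp [qIter, stepQueue_nil, qIter_nil E f]

theorem qIter_add (E : PySem.Dict Int (List Int)) :
    ∀ (s t : Nat) (q : List Int), qIter E (s + t) q = qIter E t (qIter E s q)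
  | 0, t, q => by rw [Nat.zero_add]; rfl
  | s + 1, t, q => by
      have : s + 1 + t = (s + t) + 1 := by omega
      rw [this]
      show qIter E (s + t) (stepQueue E q) = qIter E t (qIter E s (stepQueue E q))
      exact qIter_add E s t (stepQueue E q)

-- characterisation of A's while-loop
theorem loopA_spec (E : PySem.Dict Int (List Int)) :
    ∀ (f : Nat) (q : List Int),
      (loopA E f q).2 = qIter E (loopA E f q).1 q ∧
      (loopA E f q).1 ≤ f ∧
      ((loopA E f q).1 = f ∨ qIter E (loopA E f q).1 q = [])
  | 0, q => by simp [loopA, qIter]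
  | f + 1, [] => by simp [loopA, qIter]
  | f + 1, u :: rest => by
      obtain ⟨h1, h2, h3⟩ := loopA_spec E f (stepQueue E (u :: rest))
      refine ⟨?_, ?_, ?_⟩
      · simpa [loopA, qIter] using h1
      · simpa [loopA] using by omega
      · rcases h3 with h | h
        · exact Or.inl (by simp [loopA, h])
        · exact Or.inr (by simpa [loopA, qIter] using h)

-- the tallying loop at the end of A counts occurrences of n-1
theorem foldl_count_eq (t : Int) :
    ∀ (q : List Int) (acc : Int),
      q.foldl (fun res x => res + if x = t then 1 else 0) acc = acc + (q.count t : Int)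
  | [], acc => by simp
  | x :: q, acc => by
      rw [List.foldl_cons, foldl_count_eq t q, List.count_cons]
      by_cases h : x = t <;> simp [h] <;> push_cast <;> ring

-- inner loop of stepDP: 'for v in edges[u]: ndp[v] += c'
theorem innerDP_getD (c : Int) :
    ∀ (l : List Int) (nd : PySem.Dict Int Int) (x : Int),
      (l.foldl (fun nd v => nd.modify v 0 (fun w => w + c)) nd).getD x 0
        = nd.getD x 0 + c * (l.count x : Int)
  | [], nd, x => by simp
  | v :: l, nd, x => by
      rw [List.foldl_cons, innerDP_getD c l, PySem.Dict.getD_modify, List.count_cons]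
      by_cases h : x = v
      · subst h
        simp only [if_pos rfl, BEq.rfl, if_true]
        push_cast
        ring
      · have hb : (v == x) = false := by simp [Ne.symm h]
        simp only [if_neg h, hb, if_false]
        push_cast
        ring

-- outer loop of stepDP over the items list
theorem outerDP_getD (E : PySem.Dict Int (List Int)) :
    ∀ (items : List (Int × Int)) (nd : PySem.Dict Int Int) (x : Int),
      (items.foldl (fun nd p => (E.getD p.1 []).foldl (fun nd v => nd.modify v 0 (fun w => w + p.2)) nd) nd).getD x 0
        = nd.getD x 0 + (items.map (fun p => p.2 * ((E.getD p.1 []).count x : Int))).sum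
  | [], nd, x => by simp
  | p :: items, nd, x => by
      rw [List.foldl_cons, outerDP_getD E items, innerDP_getD, List.map_cons, List.sum_cons]
      ring

-- splitting a mapped sum along a boolean predicate
theorem sum_map_filter_split (f : Int → Int) (b : Int → Bool) :
    ∀ q : List Int,
      (q.map f).sum = ((q.filter b).map f).sum + ((q.filter (fun x => !(b x))).map f).sum
  | [] => by simp
  | x :: q => by
      cases hb : b x <;>
        ·  simp [List.filter_cons, hb, sum_map_filter_split f b q]
           ring

-- the filtered sum collapses to count * value
theorem sum_filter_eq_count (f : Int → Int) (u : Int) :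
    ∀ q : List Int,
      ((q.filter (fun x => x == u)).map f).sum = (q.count u : Int) * f u
  | [] => by simp
  | a :: q => by
      by_cases h : a = u
      · subst h
        rw [List.filter_cons_of_pos (by simp), List.map_cons, List.sum_cons,
          sum_filter_eq_count f a q, List.count_cons_self]
        push_cast
        ring
      · have hb : (a == u) = false := by simp [h]
        rw [List.filter_cons_of_neg (by simp [h]), sum_filter_eq_count f u q,
          List.count_cons, hb]
        simp

-- grouped sum over nodup keys covering q equals the plain sum over q
theorem sum_keys_eq (f : Int → Int) :
    ∀ (keys : List Int), keys.Nodup →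
      ∀ (q : List Int), (∀ u ∈ q, u ∈ keys) →
        (keys.map (fun u => (q.count u : Int) * f u)).sum = (q.map f).sum
  | [], _, q, hsub => by
      have : q = [] := by
        cases q with
        | nil => rfl
        | cons a q => exact absurd (hsub a (by simp)) (by simp)
      simp [this]
  | u :: keys, hnd, q, hsub => by
      have hu : u ∉ keys := (List.nodup_cons.mp hnd).1
      have hnd' : keys.Nodup := (List.nodup_cons.mp hnd).2
      have hsub' : ∀ w ∈ q.filter (fun x => !(x == u)), w ∈ keys := by
        intro w hw
        have hwne : w ≠ u := by simpa using List.of_mem_filter hw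
        rcases List.mem_cons.mp (hsub w (List.mem_of_mem_filter hw)) with h | h
        · exact absurd h hwne
        · exact h
      have hcounts : ∀ w ∈ keys, q.count w = (q.filter (fun x => !(x == u))).count w := by
        intro w hw
        have hwu : w ≠ u := fun h => hu (h ▸ hw)
        exact (List.count_filter (by simp [hwu])).symm
      have hmapeq : (keys.map (fun w => (q.count w : Int) * f w)).sum
          = (keys.map (fun w => ((q.filter (fun x => !(x == u))).count w : Int) * f w)).sum := by
        apply congrArg
        apply List.map_congr_left
        intro w hw
        rw [hcounts w hw]
      rw [List.map_cons, List.sum_cons, sum_map_filter_split f (fun x => x == u) q,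
        sum_filter_eq_count f u q, hmapeq,
        sum_keys_eq f keys hnd' _ hsub']

-- count over a flatMap, cast to Int
theorem count_flatMap_int (g : Int → List Int) (x : Int) :
    ∀ q : List Int,
      (((q.flatMap g).count x : Int)) = (q.map (fun u => ((g u).count x : Int))).sum
  | [] => by simp
  | u :: q => by
      rw [List.flatMap_cons, List.count_append, List.map_cons, List.sum_cons,
        ← count_flatMap_int g x q]
      push_cast
      ring

-- the dp dictionary simulates the multiset of A's queue entries: one step
theorem stepDP_inv (E : PySem.Dict Int (List Int)) (dp : PySem.Dict Int Int) (q : List Int)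
    (hnd : dp.keys.Nodup) (hinv : ∀ x, dp.getD x 0 = (q.count x : Int)) :
    ∀ x, (stepDP E dp).getD x 0 = ((stepQueue E q).count x : Int) := by
  intro x
  have hq : stepQueue E q = q.flatMap (fun u => E.getD u []) := by
    unfold stepQueue
    rw [PySem.List.foldl_append_eq_flatMap]
    rfl
  have hitems := PySem.Dict.items_eq_map_keys dp hnd (0 : Int)
  have hsub : ∀ u ∈ q, u ∈ dp.keys := by
    intro u hu
    by_contra hmem
    have hc : dp.contains u = false := by
      cases h : dp.contains u
      · rfl
      · exact absurd ((PySem.Dict.contains_iff_mem_keys dp u).mp h) hmem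
    have h0 := hinv u
    rw [PySem.Dict.getD_of_not_contains dp 0 hc] at h0
    have : q.count u = 0 := by omega
    rw [List.count_eq_zero] at this
    exact this hu
  unfold stepDP
  rw [outerDP_getD, PySem.Dict.getD_empty, hitems, hq, zero_add, List.map_map,
    count_flatMap_int,
    ← sum_keys_eq (fun u => ((E.getD u []).count x : Int)) dp.keys hnd q hsub]
  apply congrArg
  apply List.map_congr_left
  intro w _
  simp [Function.comp_def, hinv w]

theorem foldl_stepDP_nodup (E : PySem.Dict Int (List Int)) :
    ∀ (items : List (Int × Int)) (d : PySem.Dict Int Int), d.keys.Nodup →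
      (items.foldl (fun nd p => (E.getD p.1 []).foldl (fun nd v => nd.modify v 0 (fun w => w + p.2)) nd) d).keys.Nodup
  | [], d, hd => hd
  | p :: items, d, hd => by
      rw [List.foldl_cons]
      exact foldl_stepDP_nodup E items _
        (PySem.Dict.nodup_keys_foldl_modify_key (E.getD p.1 []) (fun v => v) 0
          (fun _ _ => (fun w => w + p.2)) d hd)

theorem stepDP_nodup (E : PySem.Dict Int (List Int)) (dp : PySem.Dict Int Int) :
    (stepDP E dp).keys.Nodup :=
  foldl_stepDP_nodup E dp.items PySem.Dict.empty PySem.Dict.nodup_keys_empty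

-- dp with empty items gives 0 everywhere, and the tracked queue is empty
theorem getD_of_items_nil (dp : PySem.Dict Int Int) (h : dp.items = []) (x : Int) :
    dp.getD x 0 = 0 := by
  have : dp = PySem.Dict.empty := PySem.Dict.ext (by simpa using h)
  simp [this]

-- B's loop tracks the multiset of A's queue entries
theorem loopB_inv (E : PySem.Dict Int (List Int)) :
    ∀ (f : Nat) (dp : PySem.Dict Int Int) (q : List Int),
      dp.keys.Nodup → (∀ x, dp.getD x 0 = (q.count x : Int)) →
      ∀ x, (loopB E f dp).getD x 0 = ((qIter E f q).count x : Int)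
  | 0, dp, q, _, hinv, x => by simpa [loopB, qIter] using hinv x
  | f + 1, dp, q, hnd, hinv, x => by
      rw [loopB]
      by_cases h : dp.items = []
      · have hq : q = [] := by
          cases q with
          | nil => rfl
          | cons a q =>
              have := hinv a
              rw [getD_of_items_nil dp h] at this
              simp [List.count_cons] at this
              omega
        rw [if_pos h, hq, qIter_nil]
        simpa using getD_of_items_nil dp h x
      · rw [if_neg h]
        exact loopB_inv E f (stepDP E dp) (stepQueue E q)
          (stepDP_nodup E dp) (stepDP_inv E dp q hnd hinv) x

-- the initial dictionary {0: 1} matches the initial queue [0]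
theorem init_inv (x : Int) :
    (PySem.Dict.empty.insert (0 : Int) (1 : Int)).getD x 0 = (([0] : List Int).count x : Int) := by
  rw [PySem.Dict.getD_insert]
  by_cases h : x = 0 <;> simp [h, List.count_cons, eq_comm]

-- ===== VERDICT (by name: the statement is the Claim_ definition above) =====
theorem LCP07_BFS_spec : Claim_equal_LCP07_BFS := by
  intro relation k n _hdom _hpre
  unfold Spec_LCP07_BFS
  simp only [LCP07_BFS, LCP07_BFS_alt]
  generalize buildEdges relation = E
  by_cases hk : k < 0
  · rw [if_pos hk]
    have h0 : k.toNat = 0 := Int.toNat_of_nonpos (le_of_lt hk)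
    rw [h0]
    have h1 : loopA E 0 [0] = (0, [0]) := rfl
    simp [h1, show ¬((0 : Int) = k) from by omega]
  · rw [if_neg hk]
    have hB : (loopB E k.toNat (PySem.Dict.empty.insert 0 1)).getD (n - 1) 0
        = ((qIter E k.toNat [0]).count (n - 1) : Int) :=
      loopB_inv E k.toNat _ [0]
        (PySem.Dict.nodup_keys_insert _ _ _ PySem.Dict.nodup_keys_empty) init_inv (n - 1)
    obtain ⟨h1, h2, h3⟩ := loopA_spec E k.toNat [0]
    by_cases hs : ((loopA E k.toNat [0]).1 : Int) = k
    · have hfull : (loopA E k.toNat [0]).1 = k.toNat := by omega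
      rw [if_pos hs, foldl_count_eq, h1, hfull, hB]
      simp
    · rw [if_neg hs, hB]
      have hne : (loopA E k.toNat [0]).1 ≠ k.toNat := by omega
      have hempty : qIter E (loopA E k.toNat [0]).1 [0] = [] := by
        rcases h3 with h | h
        · exact absurd h hne
        · exact h
      have hall : qIter E k.toNat [0] = [] := by
        have hsum : (loopA E k.toNat [0]).1 + (k.toNat - (loopA E k.toNat [0]).1) = k.toNat := by
          omega
        rw [← hsum, qIter_add, hempty, qIter_nil]
      rw [hall]
      simp
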